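-- pv_equiv track=rewrite | github.com/dravalico/LLMGIpy | src/scripts/function_util.py | insert_strings_after_signature
-- ===== SOURCE A (Python) =====
-- from typing import List, Any
--
-- def insert_strings_after_signature(code: str, imports: List[str]) -> str:
--     if imports == []:
--         return code
--     code_lines: List[str] = code.split('\n')
--     function_line_index: str = next((i for i, line in enumerate(code_lines) if line.strip().startswith("def")), None)
--     if function_line_index is None:
--         raise ValueError("Problems with the function")
--     for string in imports:
--         code_lines.insert(function_line_index + 1, '\t' + string)
--     modified_code = '\n'.join(code_lines)
--     return modified_code
-- ===== SOURCE B (Python) =====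
-- def insert_strings_after_signature(code, imports):
--     if imports == []:
--         return code
--     result = []
--     inserted = False
--     for line in code.split('\n'):
--         result.append(line)
--         if not inserted and line.strip().startswith('def'):
--             for imp in reversed(imports):
--                 result.append('\t' + imp)
--             inserted = True
--     if not inserted:
--         raise ValueError("Problems with the function")
--     return '\n'.join(result)
-- ===== Notes on version B (the rewrite author's own statement) =====
-- stated objective: alternative
-- what changed: B rebuilds the line list in a single pass with an inserted flag, appending the reversed tab-prefixed imports right after the first 'def' line, instead of A's repeated list.insert at a fixed index after an enumerate search.
import Mathlib
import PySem

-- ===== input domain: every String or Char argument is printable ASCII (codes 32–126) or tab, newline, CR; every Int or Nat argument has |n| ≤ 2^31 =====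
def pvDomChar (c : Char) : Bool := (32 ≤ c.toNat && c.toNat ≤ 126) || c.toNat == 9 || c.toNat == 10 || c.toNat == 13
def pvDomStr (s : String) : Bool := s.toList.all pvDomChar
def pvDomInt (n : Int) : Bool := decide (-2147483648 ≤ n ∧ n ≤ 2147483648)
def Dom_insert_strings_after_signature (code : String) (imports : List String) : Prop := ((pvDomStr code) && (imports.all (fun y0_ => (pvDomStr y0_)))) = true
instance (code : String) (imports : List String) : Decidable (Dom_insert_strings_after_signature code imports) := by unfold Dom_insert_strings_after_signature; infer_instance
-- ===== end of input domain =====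

-- ===== PORT A =====
-- B inserts the imports in one pass while rebuilding the line list; A repeatedly calls list.insert
-- at a fixed index.  Objective: alternative decomposition; return value only (neither mutates).

-- line.strip().startswith("def")
def pvIsDefLine (line : String) : Bool :=
  PySem.Str.startswith (PySem.Str.strip line) "def"

def insert_strings_after_signature (code : String) (imports : List String) : String :=
  if imports = [] then code
  else
    let code_lines : List String := (PySem.Str.split? code "\n").getD []
    -- next((i for i, line in enumerate(code_lines) if line.strip().startswith("def")), None)
    match (PySem.List.enumerate code_lines).find? (fun q => pvIsDefLine q.2) with
    | none => ""  -- Python raises ValueError here; excluded by Pre_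
    | some (i, _) =>
      -- for string in imports: code_lines.insert(function_line_index + 1, '\t' + string)
      let code_lines := imports.foldl (fun ls s => PySem.List.insert ls (i + 1) ("\t" ++ s)) code_lines
      PySem.Str.join "\n" code_lines

-- ===== PORT B =====
-- the body of B's single for-loop: append the line; right after the first "def" line also
-- append each import of reversed(imports) prefixed with '\t' and set the inserted flag
def pvStepB (imports : List String) (st : List String × Bool) (line : String) : List String × Bool :=
  let res := st.1 ++ [line]
  if !st.2 && pvIsDefLine line then
    (res ++ imports.reverse.map (fun s => "\t" ++ s), true)
  else (res, st.2)

def insert_strings_after_signature_alt (code : String) (imports : List String) : String :=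
  if imports = [] then code
  else
    let r := ((PySem.Str.split? code "\n").getD []).foldl (pvStepB imports) ([], false)
    if r.2 then PySem.Str.join "\n" r.1 else ""  -- Python raises ValueError in the else branch; excluded by Pre_

-- ===== PRECONDITION & SPEC =====
-- Pre_ excludes exactly the inputs where A raises ValueError: a non-empty imports list with no
-- line of code whose strip() starts with "def" (B raises the same ValueError there).
def Pre_insert_strings_after_signature (code : String) (imports : List String) : Prop :=
  imports = [] ∨ ∃ l ∈ (PySem.Str.split? code "\n").getD [], pvIsDefLine l = true
instance (code : String) (imports : List String) : Decidable (Pre_insert_strings_after_signature code imports) := by unfold Pre_insert_strings_after_signature; infer_instance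

def pvWitness_insert_strings_after_signature : String × List String :=
  ("def f():\n    return 1", ["import os"])

def Spec_insert_strings_after_signature (code : String) (imports : List String) (out : String) : Prop := out = insert_strings_after_signature_alt code imports
instance (code : String) (imports : List String) (out : String) : Decidable (Spec_insert_strings_after_signature code imports out) := by unfold Spec_insert_strings_after_signature; infer_instance

-- ===== CLAIM (what is proved, stated in full; the proofs are below) =====
def Claim_equal_insert_strings_after_signature : Prop := ∀ (code : String) (imports : List String), Dom_insert_strings_after_signature code imports → Pre_insert_strings_after_signature code imports → Spec_insert_strings_after_signature code imports (insert_strings_after_signature code imports)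

-- ===== LEMMAS AND PROOFS =====

-- A's enumerate/next search returns (as its first component) the first index satisfying the predicate.
theorem pv_enumFind_fst (lines : List String) (s : Int) :
    ((PySem.List.enumerate lines s).find? (fun q => pvIsDefLine q.2)).map (·.1)
      = (lines.findIdx? pvIsDefLine).map (fun k => s + (k : Int)) := by
  induction lines generalizing s with
  | nil => simp [PySem.List.enumerate]
  | cons x xs ih =>
    rw [PySem.List.enumerate_cons, List.find?_cons, List.findIdx?_cons]
    by_cases h : pvIsDefLine x
    · simp [h]
    · simp only [h]
      rw [ih (s + 1)]
      cases hx : xs.findIdx? pvIsDefLine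
      · simp
      · simp
        ring_nf

-- A's repeated list.insert at the fixed index k+1 splices reversed tab-prefixed imports there.
theorem pv_foldl_insert (imps : List String) (ls : List String) (k : Nat)
    (h : k + 1 ≤ ls.length) :
    imps.foldl (fun ls s => PySem.List.insert ls ((k : Int) + 1) ("\t" ++ s)) ls
      = ls.take (k + 1) ++ imps.reverse.map (fun s => "\t" ++ s) ++ ls.drop (k + 1) := by
  induction imps generalizing ls with
  | nil => simp
  | cons s rest ih =>
    have hcast : ((k : Int) + 1) = ((k + 1 : Nat) : Int) := by push_cast; ring
    rw [List.foldl_cons, hcast, PySem.List.insert_natCast ls (k + 1) ("\t" ++ s) h]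
    have hlen : (ls.take (k + 1)).length = k + 1 := by
      simp [List.length_take]; omega
    rw [← hcast, ih _ (by simp; omega)]
    rw [List.take_append_of_le_length (by omega), List.take_take,
        List.drop_append_of_le_length (by omega)]
    simp [List.drop_of_length_le (le_of_eq hlen)]

-- After the flag is set, B's fold just appends the remaining lines.
theorem pv_foldB_true (imports : List String) (ls : List String) (res : List String) :
    ls.foldl (pvStepB imports) (res, true) = (res ++ ls, true) := by
  induction ls generalizing res with
  | nil => simp
  | cons x xs ih =>
    rw [List.foldl_cons]
    have hstep : pvStepB imports (res, true) x = (res ++ [x], true) := by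
      simp [pvStepB]
    rw [hstep, ih]
    simp

-- Before the flag is set, B's fold splices at the first matching line.
theorem pv_foldB_false (imports : List String) (ls : List String) (res : List String) (k : Nat)
    (h : ls.findIdx? pvIsDefLine = some k) :
    ls.foldl (pvStepB imports) (res, false)
      = (res ++ ls.take (k + 1) ++ imports.reverse.map (fun s => "\t" ++ s) ++ ls.drop (k + 1), true) := by
  induction ls generalizing res k with
  | nil => simp at h
  | cons x xs ih =>
    rw [List.findIdx?_cons] at h
    by_cases hx : pvIsDefLine x
    · have hk : k = 0 := by simp [hx] at h; omega
      subst hk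
      rw [List.foldl_cons]
      have hstep : pvStepB imports (res, false) x
          = (res ++ [x] ++ imports.reverse.map (fun s => "\t" ++ s), true) := by
        simp [pvStepB, hx]
      rw [hstep, pv_foldB_true]
      simp
    · simp only [hx] at h
      cases hxs : xs.findIdx? pvIsDefLine with
      | none => rw [hxs] at h; simp at h
      | some k' =>
        rw [hxs] at h
        have hk : k = k' + 1 := by simp at h; omega
        subst hk
        rw [List.foldl_cons]
        have hstep : pvStepB imports (res, false) x = (res ++ [x], false) := by
          simp [pvStepB, hx]
        rw [hstep, ih _ _ hxs]
        simp

-- the first index found by findIdx? is a valid index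
theorem pv_findIdx_lt {p : String → Bool} {ls : List String} {k : Nat}
    (h : ls.findIdx? p = some k) : k < ls.length := by
  induction ls generalizing k with
  | nil => simp at h
  | cons x xs ih =>
    rw [List.findIdx?_cons] at h
    by_cases hx : p x
    · have : k = 0 := by simp [hx] at h; omega
      simp [this]
    · simp only [hx] at h
      cases hxs : xs.findIdx? p with
      | none => rw [hxs] at h; simp at h
      | some k' =>
        rw [hxs] at h
        have hk : k = k' + 1 := by simp at h; omega
        have := ih hxs
        simp
        omega

-- ===== VERDICT (by name: the statement is the Claim_ definition above) =====
theorem insert_strings_after_signature_spec : Claim_equal_insert_strings_after_signature := by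
  intro code imports _ hpre
  unfold Spec_insert_strings_after_signature
  unfold insert_strings_after_signature insert_strings_after_signature_alt
  by_cases hi : imports = []
  · simp [hi]
  · simp only [if_neg hi]
    set lines := (PySem.Str.split? code "\n").getD [] with hlines
    rcases hpre with h | ⟨l, hl, hpl⟩
    · exact absurd h hi
    have hsome : (lines.findIdx? pvIsDefLine).isSome := by
      rw [List.findIdx?_isSome, List.any_eq_true]; exact ⟨l, hl, hpl⟩
    obtain ⟨k, hk⟩ := Option.isSome_iff_exists.mp hsome
    have hklt : k < lines.length := pv_findIdx_lt hk
    have hfind := pv_enumFind_fst lines 0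
    rw [hk] at hfind
    cases hfe : (PySem.List.enumerate lines 0).find? (fun q => pvIsDefLine q.2) with
    | none => rw [hfe] at hfind; simp at hfind
    | some pr =>
      obtain ⟨i, l'⟩ := pr
      rw [hfe] at hfind
      simp at hfind
      rw [hfind]
      show PySem.Str.join "\n" (imports.foldl (fun ls s => PySem.List.insert ls ((k : Int) + 1) ("\t" ++ s)) lines) = _
      rw [pv_foldl_insert imports lines k (by omega)]
      rw [pv_foldB_false imports lines [] k hk]
      simp
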